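-- pv_equiv track=rewrite | github.com/eywalker/orcabridge | src/orcabridge/utils/stream_utils.py | join_tags
-- ===== SOURCE A (Python) =====
-- from typing import TypeVar
-- from collections.abc import Collection, Mapping
--
-- K = TypeVar("K")
--
-- V = TypeVar("V")
--
-- def join_tags(tag1: Mapping[K, V], tag2: Mapping[K, V]) -> Mapping[K, V] | None:
--     """
--     Joins two tags together. If the tags have the same key, the value must be the same or None will be returned.
--     """
--     joined_tag = dict(tag1)
--     for k, v in tag2.items():
--         if k in joined_tag and joined_tag[k] != v:
--             # Detected a mismatch in the tags, return None
--             return None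
--         else:
--             joined_tag[k] = v
--     return joined_tag
-- ===== SOURCE B (Python) =====
-- def join_tags(tag1, tag2):
--     # Conflict detection by counting: a key maps to two different values somewhere
--     # iff the number of distinct (key, value) pairs exceeds the number of distinct keys.
--     pairs = set(tag1.items()) | set(tag2.items())
--     if len(pairs) != len({k for k, _ in pairs}):
--         return None
--     return {**tag1, **tag2}
-- ===== Notes on version B (the rewrite author's own statement) =====
-- stated objective: alternative
-- what changed: Replaces A's interleaved merge loop that compares values key-by-key and early-returns by a cardinality argument with no value comparison at all: pool the distinct (key,value) pairs of both mappings into one set and declare a conflict exactly when there are more distinct pairs than distinct keys; the merge itself is a one-shot {**tag1, **tag2}.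
import Mathlib
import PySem

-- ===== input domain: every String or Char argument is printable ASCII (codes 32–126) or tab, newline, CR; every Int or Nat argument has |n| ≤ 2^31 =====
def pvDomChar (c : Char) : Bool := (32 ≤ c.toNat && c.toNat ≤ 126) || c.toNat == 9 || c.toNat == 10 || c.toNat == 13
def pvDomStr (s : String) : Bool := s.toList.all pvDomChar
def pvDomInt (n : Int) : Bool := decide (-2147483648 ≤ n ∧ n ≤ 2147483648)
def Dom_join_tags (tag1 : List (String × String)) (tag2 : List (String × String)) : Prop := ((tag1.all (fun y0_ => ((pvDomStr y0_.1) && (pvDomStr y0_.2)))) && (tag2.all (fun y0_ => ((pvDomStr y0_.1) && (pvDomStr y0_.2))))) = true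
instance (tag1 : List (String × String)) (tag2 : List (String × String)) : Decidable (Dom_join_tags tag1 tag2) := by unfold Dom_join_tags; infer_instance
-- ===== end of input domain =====

-- B detects a conflict by counting (more distinct (key,value) pairs than distinct keys)
-- instead of A's key-by-key value-comparing merge loop; objective: alternative.


-- ===== PORT A =====
-- the for-loop of A: early return None on a mismatching existing key, else joined_tag[k] = v
def joinTagsLoopA (joined : PySem.Dict String String) (items : List (String × String)) :
    Option (PySem.Dict String String) :=
  match items with
  | [] => some joined
  | (k, v) :: rest =>
    match joined.get? k with
    | some w => if w ≠ v then none else joinTagsLoopA (joined.insert k v) rest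
    | none => joinTagsLoopA (joined.insert k v) rest

def join_tags (tag1 : List (String × String)) (tag2 : List (String × String)) :
    Option (List (String × String)) :=
  (joinTagsLoopA (PySem.Dict.ofList tag1) (PySem.Dict.ofList tag2).items).map PySem.Dict.items

-- ===== PORT B =====
-- pairs = set(tag1.items()) | set(tag2.items()); None iff len(pairs) != len({k for k,_ in pairs});
-- else {**tag1, **tag2}
def join_tags_alt (tag1 : List (String × String)) (tag2 : List (String × String)) :
    Option (List (String × String)) :=
  if PySem.Set.len (PySem.Set.union (PySem.Set.ofList (PySem.Dict.ofList tag1).items)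
        (PySem.Set.ofList (PySem.Dict.ofList tag2).items))
      ≠ PySem.Set.len (PySem.Set.ofList
        ((PySem.Set.union (PySem.Set.ofList (PySem.Dict.ofList tag1).items)
          (PySem.Set.ofList (PySem.Dict.ofList tag2).items)).map Prod.fst))
  then none
  else some (((PySem.Dict.ofList tag2).items.foldl (fun d p => d.insert p.1 p.2)
    (PySem.Dict.ofList tag1)).items)

-- ===== PRECONDITION & SPEC =====
def Spec_join_tags (tag1 : List (String × String)) (tag2 : List (String × String)) (out : Option (List (String × String))) : Prop := out = join_tags_alt tag1 tag2
instance (tag1 : List (String × String)) (tag2 : List (String × String)) (out : Option (List (String × String))) : Decidable (Spec_join_tags tag1 tag2 out) := by unfold Spec_join_tags; infer_instance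

-- ===== CLAIM (what is proved, stated in full; the proofs are below) =====
def Claim_equal_join_tags : Prop := ∀ (tag1 : List (String × String)) (tag2 : List (String × String)), Dom_join_tags tag1 tag2 → Spec_join_tags tag1 tag2 (join_tags tag1 tag2)

-- ===== LEMMAS AND PROOFS =====

-- the per-item conflict test of A ("k in joined and joined[k] != v"), named for the proofs
def conflictP (j : PySem.Dict String String) (p : String × String) : Bool :=
  match j.get? p.1 with | some w => w != p.2 | none => false

theorem any_congr_mem {α : Type} (l : List α) (p q : α → Bool) (h : ∀ a ∈ l, p a = q a) :
    l.any p = l.any q := by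
  induction l with
  | nil => rfl
  | cons a l ih =>
    simp only [List.any_cons, h a (List.mem_cons_self), ih (fun b hb => h b (List.mem_cons_of_mem a hb))]

-- A's loop, on an item list with distinct keys, is: no conflict, then fold-in all items.
theorem joinTagsLoopA_eq (items : List (String × String)) (j : PySem.Dict String String)
    (hnd : (items.map Prod.fst).Nodup) :
    joinTagsLoopA j items =
      if items.any (conflictP j) then none
      else some (items.foldl (fun d p => d.insert p.1 p.2) j) := by
  induction items generalizing j with
  | nil => simp [joinTagsLoopA]
  | cons hd rest ih =>
    obtain ⟨k, v⟩ := hd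
    simp only [List.map_cons, List.nodup_cons] at hnd
    have hany : rest.any (conflictP (j.insert k v)) = rest.any (conflictP j) := by
      apply any_congr_mem
      intro p hp
      unfold conflictP
      rw [PySem.Dict.get?_insert_of_ne j v (fun h => hnd.1 (by rw [← h]; exact List.mem_map_of_mem hp))]
    rw [List.any_cons, List.foldl_cons]
    cases hjk : j.get? k with
    | some w =>
      by_cases hwv : w = v
      · subst hwv
        rw [show joinTagsLoopA j ((k, w) :: rest) = joinTagsLoopA (j.insert k w) rest from by
          simp [joinTagsLoopA, hjk]]
        rw [ih _ hnd.2, hany, show conflictP j (k, w) = false from by simp [conflictP, hjk],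
          Bool.false_or]
      · rw [show joinTagsLoopA j ((k, v) :: rest) = none from by simp [joinTagsLoopA, hjk, hwv],
          show conflictP j (k, v) = true from by simp [conflictP, hjk, bne_iff_ne, hwv]]
        simp
    | none =>
      rw [show joinTagsLoopA j ((k, v) :: rest) = joinTagsLoopA (j.insert k v) rest from by
        simp [joinTagsLoopA, hjk]]
      rw [ih _ hnd.2, hany, show conflictP j (k, v) = false from by simp [conflictP, hjk],
        Bool.false_or]

-- building a set from a list is a sublist of it (PySem.Set.add keeps or appends)
theorem foldl_add_sublist {α : Type} [BEq α] [LawfulBEq α] (l : List α) (s : List α) :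
    (l.foldl PySem.Set.add s).Sublist (s ++ l) := by
  induction l generalizing s with
  | nil => simp
  | cons x l ih =>
    have h2 : (PySem.Set.add s x).Sublist (s ++ [x]) := by
      rw [PySem.Set.add_eq_ite]
      split
      · exact List.sublist_append_left s [x]
      · exact List.Sublist.refl _
    have h3 := List.Sublist.trans (ih (PySem.Set.add s x)) (h2.append_right l)
    simpa [List.append_assoc] using h3

-- the set of a list has the list's size iff the list has no duplicates
theorem setLen_eq_iff_nodup {α : Type} [BEq α] [LawfulBEq α] (l : List α) :
    (PySem.Set.ofList l).length = l.length ↔ l.Nodup := by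
  constructor
  · intro h
    have hsub : (PySem.Set.ofList l).Sublist l := by
      have := foldl_add_sublist l (PySem.Set.empty)
      simpa [PySem.Set.ofList_eq_foldl, PySem.Set.empty_eq] using this
    have := hsub.eq_of_length h
    rw [← this]
    exact PySem.Set.nodup_ofList l
  · intro h
    rw [PySem.Set.ofList_eq_self_of_nodup l h]

theorem keys_eq_map_fst (d : PySem.Dict String String) :
    d.keys = d.items.map Prod.fst := List.toList_toArray

-- items of ofList are nodup as pairs
theorem nodup_items_ofList (l : List (String × String)) :
    (PySem.Dict.ofList l).items.Nodup := by
  have h := PySem.Dict.nodup_keys_ofList (ν := String) l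
  rw [keys_eq_map_fst] at h
  exact h.of_map

-- pairs = items1 ++ (items2 minus the pairs already in items1)
theorem pairs_eq (tag1 tag2 : List (String × String)) :
    PySem.Set.union (PySem.Set.ofList (PySem.Dict.ofList tag1).items)
        (PySem.Set.ofList (PySem.Dict.ofList tag2).items)
      = (PySem.Dict.ofList tag1).items ++
        ((PySem.Dict.ofList tag2).items.filter
          (fun y => !((PySem.Dict.ofList tag1).items.contains y))) := by
  rw [PySem.Set.union_eq_update, PySem.Set.update_eq_append_filter, PySem.Set.ofList_ofList,
    PySem.Set.ofList_eq_self_of_nodup _ (nodup_items_ofList tag1),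
    PySem.Set.ofList_eq_self_of_nodup _ (nodup_items_ofList tag2)]
  simp [PySem.Set.contains_eq_listContains]

-- the counting test and A's conflict test coincide: keys of (items1 ++ filtered items2)
-- are nodup iff no key of tag2 carries a value different from tag1's
theorem nodup_iff_no_conflict (tag1 tag2 : List (String × String)) :
    (((PySem.Dict.ofList tag1).items ++
        ((PySem.Dict.ofList tag2).items.filter
          (fun y => !((PySem.Dict.ofList tag1).items.contains y)))).map Prod.fst).Nodup
      ↔ (PySem.Dict.ofList tag2).items.any (conflictP (PySem.Dict.ofList tag1)) = false := by
  set d1 := PySem.Dict.ofList tag1 with hd1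
  set d2 := PySem.Dict.ofList tag2 with hd2
  have hnd1 : d1.keys.Nodup := PySem.Dict.nodup_keys_ofList tag1
  have hnd2 : d2.keys.Nodup := PySem.Dict.nodup_keys_ofList tag2
  rw [List.map_append, List.nodup_append]
  have hA : (d1.items.map Prod.fst).Nodup := by rw [← keys_eq_map_fst]; exact hnd1
  have hB : (((d2.items.filter (fun y => !(d1.items.contains y))).map Prod.fst)).Nodup := by
    have hs : ((d2.items.filter (fun y => !(d1.items.contains y))).map Prod.fst).Sublist
        (d2.items.map Prod.fst) := List.Sublist.map Prod.fst List.filter_sublist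
    exact ((keys_eq_map_fst d2) ▸ hnd2).sublist hs
  constructor
  · rintro ⟨-, -, hdisj⟩
    rw [List.any_eq_false]
    rintro ⟨k, v⟩ hmem
    simp only [conflictP]
    cases hg : d1.get? k with
    | none => simp
    | some w =>
      simp only [bne_iff_ne, ne_eq, not_not]
      by_contra hwv
      have hkA : k ∈ d1.items.map Prod.fst := by
        rw [← keys_eq_map_fst]
        by_contra hk
        rw [(PySem.Dict.get?_eq_none_iff_not_mem_keys d1 k).mpr hk] at hg
        simp at hg
      have hnotin : (k, v) ∉ d1.items := by
        intro hin
        have := (PySem.Dict.get?_eq_some_iff_mem_items d1 k v hnd1).mpr hin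
        rw [hg] at this
        exact hwv (Option.some.inj this)
      have hkB : k ∈ (d2.items.filter (fun y => !(d1.items.contains y))).map Prod.fst := by
        refine List.mem_map_of_mem (List.mem_filter.mpr ⟨hmem, ?_⟩)
        simpa using hnotin
      exact hdisj k hkA k hkB rfl
  · intro hnoc
    refine ⟨hA, hB, ?_⟩
    rintro k hkA b hkB rfl
    obtain ⟨⟨k', v⟩, hpf, hk'⟩ := List.mem_map.mp hkB
    obtain ⟨hmem2, hnotin1⟩ := List.mem_filter.mp hpf
    subst hk'
    rw [← keys_eq_map_fst] at hkA
    cases hg : d1.get? k' with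
    | none =>
      exact absurd ((PySem.Dict.get?_eq_none_iff_not_mem_keys d1 k').mp hg) (by simpa using hkA)
    | some w =>
      have hw := (List.any_eq_false.mp hnoc) (k', v) hmem2
      simp only [conflictP, hg, bne_iff_ne, ne_eq, not_not] at hw
      subst hw
      have hin : (k', w) ∈ d1.items := PySem.Dict.mem_items_of_get?_eq_some d1 hg
      have hnotin1' : (k', w) ∉ d1.items := by simpa using hnotin1
      exact hnotin1' hin

-- B's counting condition holds (lengths equal) iff A's loop finds no conflict
theorem counting_iff (tag1 tag2 : List (String × String)) :
    (PySem.Set.len (PySem.Set.union (PySem.Set.ofList (PySem.Dict.ofList tag1).items)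
        (PySem.Set.ofList (PySem.Dict.ofList tag2).items))
      = PySem.Set.len (PySem.Set.ofList
        ((PySem.Set.union (PySem.Set.ofList (PySem.Dict.ofList tag1).items)
          (PySem.Set.ofList (PySem.Dict.ofList tag2).items)).map Prod.fst)))
    ↔ (PySem.Dict.ofList tag2).items.any (conflictP (PySem.Dict.ofList tag1)) = false := by
  rw [pairs_eq]
  rw [PySem.Set.len_eq, PySem.Set.len_eq, Nat.cast_inj,
    show ((PySem.Dict.ofList tag1).items ++
        ((PySem.Dict.ofList tag2).items.filter
          (fun y => !((PySem.Dict.ofList tag1).items.contains y)))).length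
      = (((PySem.Dict.ofList tag1).items ++
        ((PySem.Dict.ofList tag2).items.filter
          (fun y => !((PySem.Dict.ofList tag1).items.contains y)))).map Prod.fst).length
      from by simp,
    eq_comm, setLen_eq_iff_nodup]
  exact nodup_iff_no_conflict tag1 tag2

-- ===== VERDICT (by name: the statement is the Claim_ definition above) =====
theorem join_tags_spec : Claim_equal_join_tags := by
  intro tag1 tag2 _
  unfold Spec_join_tags join_tags join_tags_alt
  rw [joinTagsLoopA_eq _ _ (by
    rw [← keys_eq_map_fst]; exact PySem.Dict.nodup_keys_ofList tag2)]
  rcases hc : (PySem.Dict.ofList tag2).items.any (conflictP (PySem.Dict.ofList tag1)) with _ | _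
  · rw [if_neg (by simp), if_neg (fun h => h ((counting_iff tag1 tag2).mpr hc))]
    rfl
  · rw [if_pos (by simp),
      if_pos (fun h => by rw [(counting_iff tag1 tag2).mp h] at hc; exact Bool.false_ne_true hc)]
    rfl
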